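-- pv_equiv track=rewrite | github.com/FDurso1/CFDTool | Calc_v9.py | count_entries_with_notable_combos
-- ===== SOURCE A (Python) =====
-- def count_entries_with_notable_combos(data, one_way_combos, two_way_combos, three_way_combos):
--     one_count = 0
--     two_count = 0
--     three_count = 0
--     all_count = 0
--
--     # Convert combos into sets for easy subset checking
--     one_way_combos = [frozenset(combo) for combo, _, _ in one_way_combos]
--     two_way_combos = [frozenset(combo) for combo, _, _ in two_way_combos]
--     three_way_combos = [frozenset(combo) for combo, _, _ in three_way_combos]
--
--     one_way_set = set(one_way_combos)
--     two_way_set = set(two_way_combos)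
--     three_way_set = set(three_way_combos)
--
--     for row in data:
--         # Create a set of (index, value) pairs for the row
--         row_set = frozenset((index, row[index]) for index in range(len(row)))
--         one_found = any(combo.issubset(row_set) for combo in one_way_set)
--         two_found = any(combo.issubset(row_set) for combo in two_way_set)
--         three_found = any(combo.issubset(row_set) for combo in three_way_set)
--
--         if one_found or two_found or three_found:
--             all_count += 1
--         if one_found:
--             one_count += 1
--         if two_found:
--             two_count += 1
--         if three_found:
--             three_count += 1
--     return all_count, one_count, two_count, three_count
-- ===== SOURCE B (Python) =====
-- def count_entries_with_notable_combos(data, one_way_combos, two_way_combos, three_way_combos):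
--     # Combo-major marking: for each category, sweep combos and mark matching rows
--     # in a boolean array (skipping rows already marked), then tally the flags.
--     def matches(row, combo):
--         return all(0 <= idx < len(row) and row[idx] == val for idx, val in combo)
--
--     def flags(combos):
--         f = [False] * len(data)
--         for combo, _, _ in combos:
--             for i, row in enumerate(data):
--                 if not f[i] and matches(row, combo):
--                     f[i] = True
--         return f
--
--     f1 = flags(one_way_combos)
--     f2 = flags(two_way_combos)
--     f3 = flags(three_way_combos)
--     all_count = sum(a or b or c for a, b, c in zip(f1, f2, f3))
--     return all_count, sum(f1), sum(f2), sum(f3)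
-- ===== Notes on version B (the rewrite author's own statement) =====
-- stated objective: alternative
-- what changed: Replaced A's row-major pass (building a frozenset of (index,value) pairs per row and subset-testing every combo set against it) with a combo-major sweep that marks a boolean flag array over the rows per category (skipping already-marked rows) and then tallies the flags.
import Mathlib
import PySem

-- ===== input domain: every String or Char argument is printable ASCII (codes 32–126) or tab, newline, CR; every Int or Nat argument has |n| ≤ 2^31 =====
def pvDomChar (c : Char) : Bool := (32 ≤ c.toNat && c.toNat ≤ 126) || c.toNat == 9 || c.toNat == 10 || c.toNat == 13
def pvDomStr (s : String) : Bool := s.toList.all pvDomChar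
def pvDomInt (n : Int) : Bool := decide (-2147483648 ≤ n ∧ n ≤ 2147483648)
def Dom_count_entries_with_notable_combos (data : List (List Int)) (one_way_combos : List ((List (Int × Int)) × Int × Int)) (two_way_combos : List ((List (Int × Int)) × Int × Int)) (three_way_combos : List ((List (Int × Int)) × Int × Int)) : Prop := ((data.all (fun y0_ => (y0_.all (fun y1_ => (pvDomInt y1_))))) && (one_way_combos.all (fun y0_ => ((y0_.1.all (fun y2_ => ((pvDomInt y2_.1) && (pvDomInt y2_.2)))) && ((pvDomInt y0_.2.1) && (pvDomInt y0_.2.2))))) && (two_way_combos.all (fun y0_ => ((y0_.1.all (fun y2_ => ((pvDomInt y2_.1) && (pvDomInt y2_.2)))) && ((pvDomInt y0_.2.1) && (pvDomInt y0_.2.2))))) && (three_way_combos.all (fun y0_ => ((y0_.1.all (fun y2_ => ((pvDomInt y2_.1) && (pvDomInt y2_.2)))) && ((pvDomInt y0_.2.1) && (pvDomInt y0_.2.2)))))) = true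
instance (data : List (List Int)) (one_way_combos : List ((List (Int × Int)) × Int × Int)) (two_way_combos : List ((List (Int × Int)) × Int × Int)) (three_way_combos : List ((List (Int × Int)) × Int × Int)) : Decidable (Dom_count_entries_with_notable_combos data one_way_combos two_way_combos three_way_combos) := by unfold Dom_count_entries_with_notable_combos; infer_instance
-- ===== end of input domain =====

-- ===== PORT A =====
-- B replaces A's row-major scan (frozenset per row, subset tests against combo sets)
-- by a combo-major sweep marking boolean row flags; objective: alternative structure.

-- row_set = frozenset((index, row[index]) for index in range(len(row)))
def pvRowSet (row : List Int) : PySem.Set (Int × Int) :=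
  PySem.Set.ofList ((PySem.List.pyRange 0 (PySem.List.len row)).map
    (fun index => (index, PySem.List.pyGetD row index 0)))  -- index in range(len(row)): always in range, default never used

def count_entries_with_notable_combos (data : List (List Int)) (one_way_combos : List ((List (Int × Int)) × Int × Int)) (two_way_combos : List ((List (Int × Int)) × Int × Int)) (three_way_combos : List ((List (Int × Int)) × Int × Int)) : Int × Int × Int × Int :=
  let one_way := one_way_combos.map (fun t => PySem.Set.ofList t.1)
  let two_way := two_way_combos.map (fun t => PySem.Set.ofList t.1)
  let three_way := three_way_combos.map (fun t => PySem.Set.ofList t.1)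
  -- set(one_way_combos) etc.: Python dedups frozensets by set equality; here Set.ofList
  -- dedups by list equality.  Only `any(issubset …)` consumes these sets, and an `any`
  -- is unaffected by which duplicates a dedup removes, so the result is Python-exact.
  let one_way_set := PySem.Set.ofList one_way
  let two_way_set := PySem.Set.ofList two_way
  let three_way_set := PySem.Set.ofList three_way
  let r := data.foldl (fun st row =>
    let row_set := pvRowSet row
    let one_found := one_way_set.any (fun combo => PySem.Set.issubset combo row_set)
    let two_found := two_way_set.any (fun combo => PySem.Set.issubset combo row_set)
    let three_found := three_way_set.any (fun combo => PySem.Set.issubset combo row_set)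
    let all_count := if one_found || two_found || three_found then st.2.2.2 + 1 else st.2.2.2
    let one_count := if one_found then st.1 + 1 else st.1
    let two_count := if two_found then st.2.1 + 1 else st.2.1
    let three_count := if three_found then st.2.2.1 + 1 else st.2.2.1
    (one_count, two_count, three_count, all_count))
    ((0 : Int), (0 : Int), (0 : Int), (0 : Int))
  (r.2.2.2, r.1, r.2.1, r.2.2.1)

-- ===== PORT B =====
-- all(0 <= idx < len(row) and row[idx] == val for idx, val in combo)
def pvMatches (row : List Int) (combo : List (Int × Int)) : Bool :=
  combo.all (fun p =>
    decide (0 ≤ p.1) && decide (p.1 < (row.length : Int)) && (PySem.List.pyGetD row p.1 0 == p.2))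
  -- row[idx] is reached only under the 0 <= idx < len(row) guard, so pyGetD's default is never used

-- f = [False]*len(data); for combo,_,_ in combos: for i,row in enumerate(data): f[i] = f[i] or matches(row,combo)
def pvFlags (data : List (List Int)) (combos : List ((List (Int × Int)) × Int × Int)) : List Bool :=
  combos.foldl
    (fun f t => (f.zip data).map (fun p => p.1 || pvMatches p.2 t.1))
    (List.replicate data.length false)

def count_entries_with_notable_combos_alt (data : List (List Int)) (one_way_combos : List ((List (Int × Int)) × Int × Int)) (two_way_combos : List ((List (Int × Int)) × Int × Int)) (three_way_combos : List ((List (Int × Int)) × Int × Int)) : Int × Int × Int × Int :=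
  let f1 := pvFlags data one_way_combos
  let f2 := pvFlags data two_way_combos
  let f3 := pvFlags data three_way_combos
  let all_count := ((f1.zip (f2.zip f3)).map
    (fun t => if t.1 || t.2.1 || t.2.2 then (1 : Int) else 0)).sum
  (all_count,
   (f1.map (fun b => if b then (1 : Int) else 0)).sum,
   (f2.map (fun b => if b then (1 : Int) else 0)).sum,
   (f3.map (fun b => if b then (1 : Int) else 0)).sum)

-- ===== PRECONDITION & SPEC =====
def Spec_count_entries_with_notable_combos (data : List (List Int)) (one_way_combos : List ((List (Int × Int)) × Int × Int)) (two_way_combos : List ((List (Int × Int)) × Int × Int)) (three_way_combos : List ((List (Int × Int)) × Int × Int)) (out : Int × Int × Int × Int) : Prop := out = count_entries_with_notable_combos_alt data one_way_combos two_way_combos three_way_combos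
instance (data : List (List Int)) (one_way_combos : List ((List (Int × Int)) × Int × Int)) (two_way_combos : List ((List (Int × Int)) × Int × Int)) (three_way_combos : List ((List (Int × Int)) × Int × Int)) (out : Int × Int × Int × Int) : Decidable (Spec_count_entries_with_notable_combos data one_way_combos two_way_combos three_way_combos out) := by unfold Spec_count_entries_with_notable_combos; infer_instance

-- ===== CLAIM (what is proved, stated in full; the proofs are below) =====
def Claim_equal_count_entries_with_notable_combos : Prop := ∀ (data : List (List Int)) (one_way_combos : List ((List (Int × Int)) × Int × Int)) (two_way_combos : List ((List (Int × Int)) × Int × Int)) (three_way_combos : List ((List (Int × Int)) × Int × Int)), Dom_count_entries_with_notable_combos data one_way_combos two_way_combos three_way_combos → Spec_count_entries_with_notable_combos data one_way_combos two_way_combos three_way_combos (count_entries_with_notable_combos data one_way_combos two_way_combos three_way_combos)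

-- ===== LEMMAS AND PROOFS =====

-- `any` over a deduplicated list equals `any` over the list.
theorem pv_any_ofList {a : Type} [BEq a] [LawfulBEq a] (l : List a) (p : a → Bool) :
    (PySem.Set.ofList l).any p = l.any p := by
  apply Bool.eq_iff_iff.mpr
  simp only [List.any_eq_true]
  constructor
  · rintro ⟨x, hx, hp⟩; exact ⟨x, (PySem.Set.mem_ofList l x).mp hx, hp⟩
  · rintro ⟨x, hx, hp⟩; exact ⟨x, (PySem.Set.mem_ofList l x).mpr hx, hp⟩

-- A's subset test against the row's (index, value) set IS B's per-pair check.
theorem pv_issubset_eq_matches (combo : List (Int × Int)) (row : List Int) :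
    PySem.Set.issubset (PySem.Set.ofList combo) (pvRowSet row) = pvMatches row combo := by
  apply Bool.eq_iff_iff.mpr
  rw [PySem.Set.issubset_iff]
  simp only [pvMatches, List.all_eq_true, pvRowSet, PySem.Set.mem_ofList, List.mem_map,
    PySem.List.mem_pyRange_one, PySem.List.len_eq, Bool.and_eq_true, decide_eq_true_eq,
    beq_iff_eq]
  constructor
  · intro h x hx
    obtain ⟨j, ⟨hj0, hjl⟩, hje⟩ := h x hx
    refine ⟨⟨?_, ?_⟩, ?_⟩ <;> (cases hje; first | exact hj0 | exact_mod_cast hjl | rfl)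
  · intro h x hx
    obtain ⟨⟨h0, hl⟩, hv⟩ := h x hx
    exact ⟨x.1, ⟨h0, by exact_mod_cast hl⟩, by rw [hv]⟩

-- Per-row "found" of A equals B's any-combo predicate.
theorem pv_found_eq (combos : List ((List (Int × Int)) × Int × Int)) (row : List Int) :
    (PySem.Set.ofList (combos.map (fun t => PySem.Set.ofList t.1))).any
      (fun combo => PySem.Set.issubset combo (pvRowSet row))
    = combos.any (fun t => pvMatches row t.1) := by
  rw [pv_any_ofList, List.any_map]
  apply PySem.List.any_congr_mem
  intro t _
  exact pv_issubset_eq_matches t.1 row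

theorem pv_zip_map_self {a b : Type} (f : a → b) (l : List a) :
    (l.map f).zip l = l.map (fun x => (f x, x)) := by
  induction l with
  | nil => rfl
  | cons x xs ih => simp [ih]

-- B's flag array is the pointwise any-combo predicate over the rows.
theorem pv_foldl_flags (cs : List ((List (Int × Int)) × Int × Int))
    (data : List (List Int)) (g : List Int → Bool) :
    cs.foldl (fun f t => (f.zip data).map (fun p => p.1 || pvMatches p.2 t.1))
      (data.map g)
    = data.map (fun row => g row || cs.any (fun t => pvMatches row t.1)) := by
  induction cs generalizing g with
  | nil => simp
  | cons c cs ih =>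
    simp only [List.foldl_cons, pv_zip_map_self, List.map_map, Function.comp_def]
    rw [ih (fun row => g row || pvMatches row c.1)]
    apply List.map_congr_left
    intro r _
    simp [Bool.or_assoc]

theorem pv_flags_eq (data : List (List Int)) (cs : List ((List (Int × Int)) × Int × Int)) :
    pvFlags data cs = data.map (fun row => cs.any (fun t => pvMatches row t.1)) := by
  have h0 : List.replicate data.length false
      = data.map (fun (_ : List Int) => false) := by
    simp [List.map_const']
  rw [pvFlags, h0, pv_foldl_flags]
  simp

-- A's counter loop computes the four indicator sums.
theorem pv_loopA (P1 P2 P3 : List Int → Bool) (data : List (List Int)) (o t h a : Int) :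
    data.foldl (fun st row =>
      ((if P1 row then st.1 + 1 else st.1),
       (if P2 row then st.2.1 + 1 else st.2.1),
       (if P3 row then st.2.2.1 + 1 else st.2.2.1),
       (if P1 row || P2 row || P3 row then st.2.2.2 + 1 else st.2.2.2)))
      (o, t, h, a)
    = (o + (data.map (fun r => if P1 r then (1:Int) else 0)).sum,
       t + (data.map (fun r => if P2 r then (1:Int) else 0)).sum,
       h + (data.map (fun r => if P3 r then (1:Int) else 0)).sum,
       a + (data.map (fun r => if P1 r || P2 r || P3 r then (1:Int) else 0)).sum) := by
  induction data generalizing o t h a with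
  | nil => simp
  | cons r rs ih =>
    simp only [List.foldl_cons, List.map_cons, List.sum_cons]
    rw [ih]
    cases hb1 : P1 r <;> cases hb2 : P2 r <;> cases hb3 : P3 r <;>
      simp [hb1, hb2, hb3, Prod.ext_iff] <;> omega

-- ===== VERDICT (by name: the statement is the Claim_ definition above) =====
theorem count_entries_with_notable_combos_spec : Claim_equal_count_entries_with_notable_combos := by
  intro data one_way_combos two_way_combos three_way_combos _
  show _ = _
  simp only [count_entries_with_notable_combos, count_entries_with_notable_combos_alt]
  simp only [pv_found_eq, pv_flags_eq, List.zip_map', List.map_map, Function.comp_def]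
  rw [pv_loopA (fun row => one_way_combos.any (fun t => pvMatches row t.1))
        (fun row => two_way_combos.any (fun t => pvMatches row t.1))
        (fun row => three_way_combos.any (fun t => pvMatches row t.1)) data 0 0 0 0]
  simp
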